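-- pv_equiv track=rewrite | github.com/mjedwards/cs-module-project-hash-tables | applications/expensive_seq/expensive_seq.py | expensive_seq
-- ===== SOURCE A (Python) =====
-- _dict = dict()
--
-- def expensive_seq(x, y, z):
--     # Your code here
--     _dict_item = f"{x},{y}, {z}"
--
--     if _dict.get(_dict_item):
--         return _dict[_dict_item]
--
--     if x <= 0:
--         return y + z
--
--     answer = expensive_seq(x-1, y+1, z) + expensive_seq(x-2, y+2, z*2) + expensive_seq(x-3, y+3, z*3)
--
--     _dict[_dict_item] = answer
--
--     return answer
-- ===== SOURCE B (Python) =====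
-- def expensive_seq(x, y, z):
--     # f is affine in y and z: f(x,y,z) = N(x)*y + S(x) + P(x)*z.
--     # DP over x with the three-term recurrences for N, S, P.
--     if x <= 0:
--         return y + z
--     a = b = c = (1, 0, 1)  # (N, S, P) at indices k-2, k-1, k; all (1,0,1) for k <= 0
--     for _ in range(x):
--         n = c[0] + b[0] + a[0]
--         s = (c[1] + c[0]) + (b[1] + 2 * b[0]) + (a[1] + 3 * a[0])
--         p = c[2] + 2 * b[2] + 3 * a[2]
--         a, b, c = b, c, (n, s, p)
--     return y * c[0] + c[1] + z * c[2]
-- ===== Notes on version B (the rewrite author's own statement) =====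
-- stated objective: faster
-- what changed: Replaced the three-way memoized recursion by an O(x) bottom-up DP over the coefficients of the affine form f(x,y,z)=N(x)*y+S(x)+P(x)*z, each coefficient satisfying a three-term linear recurrence; Pre_ excludes only x >= 998, where A raises RecursionError (recursion depth x exceeds CPython's default limit).
import Mathlib
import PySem

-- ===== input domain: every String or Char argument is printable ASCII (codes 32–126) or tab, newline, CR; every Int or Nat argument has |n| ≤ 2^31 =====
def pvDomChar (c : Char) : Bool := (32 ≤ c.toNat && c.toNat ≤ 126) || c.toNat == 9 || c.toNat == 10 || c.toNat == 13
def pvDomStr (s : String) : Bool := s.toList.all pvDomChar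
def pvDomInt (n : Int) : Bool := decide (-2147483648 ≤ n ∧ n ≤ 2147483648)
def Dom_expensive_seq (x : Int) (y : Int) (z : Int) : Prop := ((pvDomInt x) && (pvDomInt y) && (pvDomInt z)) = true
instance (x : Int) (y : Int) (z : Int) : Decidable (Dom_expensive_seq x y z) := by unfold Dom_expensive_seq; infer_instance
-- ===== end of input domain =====

-- B replaces A's three-way memoized recursion by an O(x) DP over the coefficients of the
-- affine form f(x,y,z) = N(x)*y + S(x) + P(x)*z (objective: faster).
-- A mutates a module-level memo dict across calls; that memo only ever caches values A
-- itself computed, so it never changes the returned value. The equivalence here is about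
-- the return value; the port threads a per-call memo starting empty.

-- ===== PORT A =====
-- Python's key is the f-string f"{x},{y}, {z}", an injective encoding of the triple
-- (commas never occur inside the rendered integers); the port keys the dict by the
-- triple itself, which is exact. `if _dict.get(k):` is int truthiness (v != 0).
def goA (x : Int) (y : Int) (z : Int) (d : Std.HashMap (Int × Int × Int) Int) :
    Int × Std.HashMap (Int × Int × Int) Int :=
  let hit : Bool := match d[(x, y, z)]? with | some v => v != 0 | none => false
  if hit then (d[(x, y, z)]?.getD 0, d)      -- `return _dict[_dict_item]`
  else if x ≤ 0 then (y + z, d)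
  else
    let p1 := goA (x - 1) (y + 1) z d
    let p2 := goA (x - 2) (y + 2) (z * 2) p1.2
    let p3 := goA (x - 3) (y + 3) (z * 3) p2.2
    let answer := p1.1 + p2.1 + p3.1
    (answer, p3.2.insert (x, y, z) answer)
termination_by x.toNat
decreasing_by all_goals omega

def expensive_seq (x : Int) (y : Int) (z : Int) : Int :=
  (goA x y z ∅).1

-- ===== PORT B =====
def expensive_seq_alt (x : Int) (y : Int) (z : Int) : Int :=
  if x ≤ 0 then y + z
  else
    let c :=
      ((List.range x.toNat).foldl
        (fun (st : (Int × Int × Int) × (Int × Int × Int) × (Int × Int × Int)) _ =>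
          let a := st.1; let b := st.2.1; let c := st.2.2
          let n := c.1 + b.1 + a.1
          let s := (c.2.1 + c.1) + (b.2.1 + 2 * b.1) + (a.2.1 + 3 * a.1)
          let p := c.2.2 + 2 * b.2.2 + 3 * a.2.2
          (b, c, (n, s, p)))
        ((1, 0, 1), (1, 0, 1), (1, 0, 1))).2.2
    y * c.1 + c.2.1 + z * c.2.2

-- ===== PRECONDITION & SPEC =====
-- Pre_ excludes exactly the inputs on which Python A raises RecursionError: A's leftmost
-- call chain recurses to depth x, so with CPython's default recursion limit (1000) it
-- raises for x ≥ 998 and returns for every x ≤ 997.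
def Pre_expensive_seq (x : Int) (y : Int) (z : Int) : Prop := x ≤ 997
instance (x : Int) (y : Int) (z : Int) : Decidable (Pre_expensive_seq x y z) := by unfold Pre_expensive_seq; infer_instance
def pvWitness_expensive_seq : Int × Int × Int := (10, -3, 7)

def Spec_expensive_seq (x : Int) (y : Int) (z : Int) (out : Int) : Prop := out = expensive_seq_alt x y z
instance (x : Int) (y : Int) (z : Int) (out : Int) : Decidable (Spec_expensive_seq x y z out) := by unfold Spec_expensive_seq; infer_instance

-- ===== CLAIM (what is proved, stated in full; the proofs are below) =====
def Claim_equal_expensive_seq : Prop := ∀ (x : Int) (y : Int) (z : Int), Dom_expensive_seq x y z → Pre_expensive_seq x y z → Spec_expensive_seq x y z (expensive_seq x y z)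

-- ===== LEMMAS AND PROOFS =====

-- (N, S, P) coefficients at index k; all indices ≤ 0 share (1,0,1), so Nat's
-- saturating subtraction matches the Int recursion's arguments x-2, x-3.
def nsp : Nat → Int × Int × Int
  | 0 => (1, 0, 1)
  | (k + 1) =>
      let a := nsp (k - 2); let b := nsp (k - 1); let c := nsp k
      (c.1 + b.1 + a.1,
       (c.2.1 + c.1) + (b.2.1 + 2 * b.1) + (a.2.1 + 3 * a.1),
       c.2.2 + 2 * b.2.2 + 3 * a.2.2)
termination_by k => k
decreasing_by all_goals omega

-- the affine closed form both programs compute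
def F (x y z : Int) : Int :=
  y * (nsp x.toNat).1 + (nsp x.toNat).2.1 + z * (nsp x.toNat).2.2

theorem F_base (x y z : Int) (hx : x ≤ 0) : F x y z = y + z := by
  have h0 : x.toNat = 0 := by omega
  rw [F, h0]
  simp [nsp]

theorem F_rec (x y z : Int) (hx : ¬ x ≤ 0) :
    F x y z = F (x - 1) (y + 1) z + F (x - 2) (y + 2) (z * 2) + F (x - 3) (y + 3) (z * 3) := by
  obtain ⟨k, hk⟩ : ∃ k : Nat, x.toNat = k + 1 := ⟨x.toNat - 1, by omega⟩
  have h1 : (x - 1).toNat = k := by omega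
  have h2 : (x - 2).toNat = k - 1 := by omega
  have h3 : (x - 3).toNat = k - 2 := by omega
  rw [F, F, F, F, h1, h2, h3, hk, nsp]
  ring

-- every memo entry holds the closed-form value of its key
def MemoInv (d : Std.HashMap (Int × Int × Int) Int) : Prop :=
  ∀ (x y z v : Int), d[(x, y, z)]? = some v → v = F x y z

theorem goA_correct_aux : ∀ (n : Nat) (x y z : Int) (d : Std.HashMap (Int × Int × Int) Int),
    x.toNat ≤ n → MemoInv d → (goA x y z d).1 = F x y z ∧ MemoInv (goA x y z d).2 := by
  intro n
  induction n with
  | zero =>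
    intro x y z d hn hI
    rw [goA]
    rcases hget : d[(x, y, z)]? with _ | v
    · have hx : x ≤ 0 := by omega
      simp only [if_pos hx]
      exact ⟨(F_base x y z hx).symm, hI⟩
    · by_cases hv : v = 0
      · have hx : x ≤ 0 := by omega
        simp only [hv, bne_self_eq_false, Bool.false_eq_true, if_false, if_pos hx]
        exact ⟨(F_base x y z hx).symm, hI⟩
      · have hvb : (v != 0) = true := by simpa using hv
        simp only [hvb, if_true, Option.getD_some]
        exact ⟨(hI x y z v hget).symm ▸ rfl, hI⟩
  | succ n ihn =>
    intro x y z d hn hI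
    rw [goA]
    have hbody : ∀ (hI' : MemoInv d),
        ((if x ≤ 0 then (y + z, d)
          else
            let p1 := goA (x - 1) (y + 1) z d
            let p2 := goA (x - 2) (y + 2) (z * 2) p1.2
            let p3 := goA (x - 3) (y + 3) (z * 3) p2.2
            let answer := p1.1 + p2.1 + p3.1
            (answer, p3.2.insert (x, y, z) answer)).1 = F x y z)
        ∧ MemoInv (if x ≤ 0 then (y + z, d)
          else
            let p1 := goA (x - 1) (y + 1) z d
            let p2 := goA (x - 2) (y + 2) (z * 2) p1.2
            let p3 := goA (x - 3) (y + 3) (z * 3) p2.2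
            let answer := p1.1 + p2.1 + p3.1
            (answer, p3.2.insert (x, y, z) answer)).2 := by
      intro hI'
      by_cases hx : x ≤ 0
      · simp only [if_pos hx]
        exact ⟨(F_base x y z hx).symm, hI'⟩
      · have ih1 := ihn (x - 1) (y + 1) z d (by omega) hI'
        have ih2 := ihn (x - 2) (y + 2) (z * 2) _ (by omega) ih1.2
        have ih3 := ihn (x - 3) (y + 3) (z * 3) _ (by omega) ih2.2
        simp only [if_neg hx]
        refine ⟨?_, ?_⟩
        · rw [ih1.1, ih2.1, ih3.1, F_rec x y z hx]
        · intro x' y' z' v hv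
          rw [Std.HashMap.getElem?_insert] at hv
          by_cases hkey : ((x, y, z) : Int × Int × Int) = (x', y', z')
          · have hbeq : (((x, y, z) : Int × Int × Int) == (x', y', z')) = true := by
              simp [hkey]
            rw [hbeq] at hv
            simp only [if_true, Option.some.injEq] at hv
            obtain ⟨h1, h2, h3⟩ : x = x' ∧ y = y' ∧ z = z' := by
              simpa [Prod.ext_iff] using hkey
            subst h1; subst h2; subst h3
            rw [← hv, ih1.1, ih2.1, ih3.1]
            exact (F_rec x y z hx).symm
          · have hbeq : (((x, y, z) : Int × Int × Int) == (x', y', z')) = false := by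
              rw [beq_eq_false_iff_ne]; exact hkey
            rw [hbeq] at hv
            simp only [Bool.false_eq_true, if_false] at hv
            exact ih3.2 x' y' z' v hv
    rcases hget : d[(x, y, z)]? with _ | v
    · simpa only [hget] using hbody hI
    · by_cases hv : v = 0
      · simp only [hv, bne_self_eq_false, Bool.false_eq_true, if_false]
        simpa using hbody hI
      · have hvb : (v != 0) = true := by simpa using hv
        simp only [hvb, if_true, Option.getD_some]
        exact ⟨(hI x y z v hget).symm ▸ rfl, hI⟩

theorem expensive_seq_eq_F (x y z : Int) : expensive_seq x y z = F x y z := by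
  have hI : MemoInv (∅ : Std.HashMap (Int × Int × Int) Int) := by
    intro x' y' z' v hv
    rw [Std.HashMap.getElem?_empty] at hv
    exact absurd hv (by simp)
  exact (goA_correct_aux x.toNat x y z ∅ le_rfl hI).1

-- the fold's invariant: after m steps the state holds nsp (m-2), nsp (m-1), nsp m
theorem foldl_nsp (m : Nat) :
    (List.range m).foldl
      (fun (st : (Int × Int × Int) × (Int × Int × Int) × (Int × Int × Int)) _ =>
        let a := st.1; let b := st.2.1; let c := st.2.2
        let n := c.1 + b.1 + a.1
        let s := (c.2.1 + c.1) + (b.2.1 + 2 * b.1) + (a.2.1 + 3 * a.1)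
        let p := c.2.2 + 2 * b.2.2 + 3 * a.2.2
        (b, c, (n, s, p)))
      ((1, 0, 1), (1, 0, 1), (1, 0, 1))
      = (nsp (m - 2), nsp (m - 1), nsp m) := by
  induction m with
  | zero => simp [nsp]
  | succ k ih =>
      rw [List.range_succ, List.foldl_append, ih]
      have hs : k + 1 - 2 = k - 1 := by omega
      simp only [List.foldl_cons, List.foldl_nil, hs]
      rw [show nsp (k + 1) =
        (let a := nsp (k - 2); let b := nsp (k - 1); let c := nsp k
         (c.1 + b.1 + a.1,
          (c.2.1 + c.1) + (b.2.1 + 2 * b.1) + (a.2.1 + 3 * a.1),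
          c.2.2 + 2 * b.2.2 + 3 * a.2.2)) from by rw [nsp]]
      simp

theorem expensive_seq_alt_eq_F (x y z : Int) : expensive_seq_alt x y z = F x y z := by
  by_cases hx : x ≤ 0
  · rw [expensive_seq_alt, if_pos hx, F_base x y z hx]
  · rw [expensive_seq_alt, if_neg hx, F]
    simp only [foldl_nsp]

-- ===== VERDICT (by name: the statement is the Claim_ definition above) =====
theorem expensive_seq_spec : Claim_equal_expensive_seq := by
  intro x y z _ _
  unfold Spec_expensive_seq
  rw [expensive_seq_eq_F, expensive_seq_alt_eq_F]
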